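-- pv_equiv track=rewrite | github.com/posl/comment_recommendation | script/mod_gen/3_time/zh/147_C/3.py | dfs
-- ===== SOURCE A (Python) =====
-- def dfs(i, n, a, x, y):
--     if i == n:
--         return 0
--     ans = 0
--     for j in range(a[i]):
--         if y[i][j] == 1:
--             ans = max(ans, dfs(i+1, n, a, x, y) + 1)
--         else:
--             ans = max(ans, dfs(i+1, n, a, x, y))
--     return ans
-- ===== SOURCE B (Python) =====
-- def dfs(i, n, a, x, y):
--     # Two staged passes: first find the stopping row t (k == n or a[k] <= 0),
--     # then count the rows in [i, t) whose first a[k] entries contain a 1.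
--     t = i
--     while t != n and a[t] > 0:
--         t += 1
--     return sum(1 in y[k][:a[k]] for k in range(i, t))
-- ===== Notes on version B (the rewrite author's own statement) =====
-- stated objective: alternative
-- what changed: Replaced the recursion that re-solves the whole suffix once per inner-loop iteration with two staged passes: one loop that only locates the stopping row t, then a sum over range(i, t) counting rows whose first a[k] entries contain a 1.
import Mathlib
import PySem

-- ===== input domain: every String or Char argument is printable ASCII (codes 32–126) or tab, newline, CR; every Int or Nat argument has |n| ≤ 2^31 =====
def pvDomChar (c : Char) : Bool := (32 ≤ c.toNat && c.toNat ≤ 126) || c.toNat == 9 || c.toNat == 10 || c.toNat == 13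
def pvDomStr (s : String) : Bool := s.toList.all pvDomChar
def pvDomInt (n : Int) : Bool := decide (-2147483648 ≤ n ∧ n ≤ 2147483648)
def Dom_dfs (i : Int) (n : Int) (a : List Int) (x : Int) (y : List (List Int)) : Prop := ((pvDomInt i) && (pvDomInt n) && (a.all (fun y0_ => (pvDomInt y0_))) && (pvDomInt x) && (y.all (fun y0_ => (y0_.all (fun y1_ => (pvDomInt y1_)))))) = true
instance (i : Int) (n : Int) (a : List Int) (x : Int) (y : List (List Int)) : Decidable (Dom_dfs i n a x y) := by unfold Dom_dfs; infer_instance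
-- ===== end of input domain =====

-- B replaces A's branching recursion by two staged passes: a loop that only
-- finds the stopping row t, then a counting sum over range(i, t)
-- (objective: alternative).


-- ===== PORT A =====
-- Fuel bounds the recursion depth: under Pre_dfs the run stops at the first
-- row t with t = n or a[t] ≤ 0, and t - i ≤ (n - i) + 2*a.length, so the fuel
-- is never exhausted there. pyGet? … |>.getD is xs[i] (Pre_dfs excludes none).
def dfsGo : Nat → Int → Int → List Int → Int → List (List Int) → Int
  | 0, _, _, _, _, _ => 0
  | f+1, i, n, a, x, y =>
    if i = n then 0
    else
      (PySem.List.pyRange 0 ((PySem.List.pyGet? a i).getD 0) 1).foldl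
        (fun ans j =>
          if (PySem.List.pyGet? ((PySem.List.pyGet? y i).getD []) j).getD 0 = 1
          then max ans (dfsGo f (i+1) n a x y + 1)
          else max ans (dfsGo f (i+1) n a x y)) 0

def dfs (i : Int) (n : Int) (a : List Int) (x : Int) (y : List (List Int)) : Int :=
  dfsGo ((n - i).toNat + 2 * a.length + 1) i n a x y

-- ===== PORT B =====
-- Stage 1 of Source B: the while loop that only advances t (same fuel bound,
-- never exhausted under Pre_dfs).
def findStop : Nat → Int → Int → List Int → Int
  | 0, t, _, _ => t
  | f+1, t, n, a =>
    if t = n then t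
    else if 0 < (PySem.List.pyGet? a t).getD 0 then findStop f (t+1) n a
    else t

-- Stage 2 of Source B: sum(1 in y[k][:a[k]] for k in range(i, t)).
def dfs_alt (i : Int) (n : Int) (a : List Int) (x : Int) (y : List (List Int)) : Int :=
  (PySem.List.pyRange i (findStop ((n - i).toNat + 2 * a.length + 1) i n a) 1).foldl
    (fun s k =>
      s + (if (PySem.List.slice ((PySem.List.pyGet? y k).getD []) none
                (some ((PySem.List.pyGet? a k).getD 0))).contains 1 then 1 else 0)) 0

-- ===== PRECONDITION & SPEC =====
-- Pre_dfs holds exactly when Python A returns normally: there is a stopping row t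
-- (t = n, or a[t] ≤ 0 at a valid index) such that every row k in [i, t) is a valid
-- index of a and y with a[k] > 0 and a[k] ≤ len(y[k]); otherwise A raises IndexError.
def Pre_dfs (i : Int) (n : Int) (a : List Int) (x : Int) (y : List (List Int)) : Prop :=
  ∃ t ∈ (n :: (List.range (2 * a.length)).map (fun j => (j : Int) - (a.length : Int))),
    i ≤ t ∧ (t = i ∨ (-(a.length : Int) ≤ i ∧ t ≤ (a.length : Int))) ∧
    (t = n ∨ (PySem.Raise.InRange a.length t ∧ (PySem.List.pyGet? a t).getD 0 ≤ 0)) ∧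
    ∀ k ∈ (n :: (List.range (2 * a.length)).map (fun j => (j : Int) - (a.length : Int))),
      i ≤ k → k < t →
        k ≠ n ∧ 0 < (PySem.List.pyGet? a k).getD 0 ∧ PySem.Raise.InRange y.length k ∧
        (PySem.List.pyGet? a k).getD 0 ≤ (((PySem.List.pyGet? y k).getD []).length : Int)
instance (i : Int) (n : Int) (a : List Int) (x : Int) (y : List (List Int)) : Decidable (Pre_dfs i n a x y) := by unfold Pre_dfs; infer_instance

def pvWitness_dfs : Int × Int × List Int × Int × List (List Int) := (0, 2, [1, 1], 0, [[1], [0]])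

def Spec_dfs (i : Int) (n : Int) (a : List Int) (x : Int) (y : List (List Int)) (out : Int) : Prop := out = dfs_alt i n a x y
instance (i : Int) (n : Int) (a : List Int) (x : Int) (y : List (List Int)) (out : Int) : Decidable (Spec_dfs i n a x y out) := by unfold Spec_dfs; infer_instance

-- ===== CLAIM (what is proved, stated in full; the proofs are below) =====
def Claim_equal_dfs : Prop := ∀ (i : Int) (n : Int) (a : List Int) (x : Int) (y : List (List Int)), Dom_dfs i n a x y → Pre_dfs i n a x y → Spec_dfs i n a x y (dfs i n a x y)

-- ===== LEMMAS AND PROOFS =====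

theorem findStop_ge (f : Nat) : ∀ (t n : Int) (a : List Int), t ≤ findStop f t n a := by
  induction f with
  | zero => intro t n a; simp [findStop]
  | succ f ih =>
    intro t n a
    simp only [findStop]
    split_ifs with h1 h2
    · exact le_refl t
    · exact le_trans (by omega) (ih (t+1) n a)
    · exact le_refl t

theorem dfsGo_nonneg (f : Nat) : ∀ (i n : Int) (a : List Int) (x : Int) (y : List (List Int)),
    0 ≤ dfsGo f i n a x y := by
  induction f with
  | zero => intro i n a x y; simp [dfsGo]
  | succ f ih =>
    intro i n a x y
    simp only [dfsGo]
    split_ifs with h1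
    · exact le_refl 0
    · have key : ∀ (L : List Int) (s : Int), 0 ≤ s →
        0 ≤ L.foldl (fun ans j =>
          if (PySem.List.pyGet? ((PySem.List.pyGet? y i).getD []) j).getD 0 = 1
          then max ans (dfsGo f (i+1) n a x y + 1)
          else max ans (dfsGo f (i+1) n a x y)) s := by
        intro L
        induction L with
        | nil => intro s hs; simpa using hs
        | cons j L ihL =>
          intro s hs
          simp only [List.foldl_cons]
          split_ifs with hj <;> exact ihL _ (le_trans hs (le_max_left _ _))
      exact key _ 0 le_rfl

-- The inner 'for j in range(m)' of A computes r + (1 if some scanned entry is 1 else 0),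
-- where r is the (constant) recursive value.
theorem foldl_max_row (l : List Int) (r : Int) (hr : 0 ≤ r) :
    ∀ (L : List Int), L ≠ [] →
      L.foldl (fun ans j =>
        if (PySem.List.pyGet? l j).getD 0 = 1
        then max ans (r + 1) else max ans r) 0 =
      r + (if ∃ j ∈ L, (PySem.List.pyGet? l j).getD 0 = 1 then 1 else 0) := by
  have gen : ∀ (L : List Int) (s : Int), 0 ≤ s → s ≤ r + 1 → L ≠ [] →
      L.foldl (fun ans j =>
        if (PySem.List.pyGet? l j).getD 0 = 1
        then max ans (r + 1) else max ans r) s =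
      max s (r + (if ∃ j ∈ L, (PySem.List.pyGet? l j).getD 0 = 1 then 1 else 0)) := by
    intro L
    induction L with
    | nil => intro s _ _ h; exact absurd rfl h
    | cons j L ihL =>
      intro s hs0 hs1 _
      simp only [List.foldl_cons]
      by_cases hL : L = []
      · subst hL
        simp only [List.foldl_nil, List.mem_singleton]
        by_cases hj : (PySem.List.pyGet? l j).getD 0 = 1 <;>
          simp [hj]
      · by_cases hj : (PySem.List.pyGet? l j).getD 0 = 1
        · rw [if_pos hj, ihL _ (le_trans hs0 (le_max_left _ _))
            (by simp only [max_def]; split_ifs <;> omega) hL]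
          have : ∃ j' ∈ j :: L, (PySem.List.pyGet? l j').getD 0 = 1 := ⟨j, by simp, hj⟩
          rw [if_pos this]
          by_cases h : ∃ j' ∈ L, (PySem.List.pyGet? l j').getD 0 = 1
          · rw [if_pos h]; simp only [max_def]; split_ifs <;> omega
          · rw [if_neg h]; simp only [max_def]; split_ifs <;> omega
        · rw [if_neg hj, ihL _ (le_trans hs0 (le_max_left _ _))
            (by simp only [max_def]; split_ifs <;> omega) hL]
          have he : (∃ j' ∈ j :: L, (PySem.List.pyGet? l j').getD 0 = 1) ↔
              (∃ j' ∈ L, (PySem.List.pyGet? l j').getD 0 = 1) := by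
            constructor
            · rintro ⟨j', hm, h1⟩
              rcases List.mem_cons.mp hm with rfl | hm'
              · exact absurd h1 hj
              · exact ⟨j', hm', h1⟩
            · rintro ⟨j', hm, h1⟩; exact ⟨j', List.mem_cons_of_mem _ hm, h1⟩
          rw [if_congr he rfl rfl]
          by_cases h : ∃ j' ∈ L, (PySem.List.pyGet? l j').getD 0 = 1
          · rw [if_pos h]; simp only [max_def]; split_ifs <;> omega
          · rw [if_neg h]; simp only [max_def]; split_ifs <;> omega
  intro L hL
  rw [gen L 0 le_rfl (by omega) hL]
  by_cases h : ∃ j ∈ L, (PySem.List.pyGet? l j).getD 0 = 1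
  · rw [if_pos h]; simp only [max_def]; split_ifs <;> omega
  · rw [if_neg h]; simp only [max_def]; split_ifs <;> omega

-- A's scanned-entries test equals B's '1 in y[k][:a[k]]'.
theorem exists_iff_mem_slice (l : List Int) (m : Int) (hm : 0 < m) :
    (∃ j ∈ PySem.List.pyRange 0 m 1, (PySem.List.pyGet? l j).getD 0 = 1) ↔
    (PySem.List.slice l none (some m)).contains 1 := by
  rw [PySem.List.slice_to l (le_of_lt hm), List.contains_iff_mem]
  constructor
  · rintro ⟨j, hj, h1⟩
    rw [PySem.List.mem_pyRange_one] at hj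
    rw [PySem.List.pyGet?_of_nonneg l hj.1] at h1
    rcases hget : l[j.toNat]? with _ | v
    · rw [hget] at h1; simp at h1
    · rw [hget] at h1
      simp only [Option.getD_some] at h1
      rcases List.getElem?_eq_some_iff.mp hget with ⟨hlen, hv⟩
      exact List.mem_take_iff_getElem.mpr ⟨j.toNat, by omega, by rw [hv, h1]⟩
  · intro h1
    rcases List.mem_take_iff_getElem.mp h1 with ⟨j, hj, hget⟩
    have hjl : j < l.length := by omega
    refine ⟨(j : Int), ?_, ?_⟩
    · rw [PySem.List.mem_pyRange_one]
      constructor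
      · exact Int.natCast_nonneg j
      · omega
    · rw [PySem.List.pyGet?_natCast, List.getElem?_eq_getElem hjl, hget]
      rfl

-- Abbreviation for B's per-row indicator, proof-side only.
def rowInd (a : List Int) (y : List (List Int)) (k : Int) : Int :=
  if (PySem.List.slice ((PySem.List.pyGet? y k).getD []) none
        (some ((PySem.List.pyGet? a k).getD 0))).contains 1 then 1 else 0

-- A's fueled recursion equals B's staged computation at the same fuel.
theorem dfsGo_eq_staged (f : Nat) : ∀ (i n : Int) (a : List Int) (x : Int) (y : List (List Int)),
    dfsGo f i n a x y =
      (PySem.List.pyRange i (findStop f i n a) 1).foldl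
        (fun s k => s + rowInd a y k) 0 := by
  induction f with
  | zero =>
    intro i n a x y
    simp [dfsGo, findStop, PySem.List.pyRange_one_eq_nil (le_refl i)]
  | succ f ih =>
    intro i n a x y
    simp only [dfsGo, findStop]
    by_cases h1 : i = n
    · simp [h1, PySem.List.pyRange_one_eq_nil (le_refl n)]
    · rw [if_neg h1, if_neg h1]
      set m := (PySem.List.pyGet? a i).getD 0 with hm
      by_cases hpos : 0 < m
      · rw [if_pos hpos]
        have hne : PySem.List.pyRange 0 m 1 ≠ [] := by
          have := PySem.List.length_pyRange_one 0 m
          intro hnil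
          rw [hnil] at this
          simp at this
          omega
        rw [foldl_max_row ((PySem.List.pyGet? y i).getD []) (dfsGo f (i+1) n a x y)
          (dfsGo_nonneg f (i+1) n a x y) _ hne]
        have hlt : i < findStop f (i+1) n a :=
          lt_of_lt_of_le (by omega) (findStop_ge f (i+1) n a)
        rw [PySem.List.pyRange_one_cons hlt, List.foldl_cons,
          PySem.List.foldl_add, ih (i+1) n a x y, PySem.List.foldl_add]
        have hind : (if ∃ j ∈ PySem.List.pyRange 0 m 1,
            (PySem.List.pyGet? ((PySem.List.pyGet? y i).getD []) j).getD 0 = 1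
            then (1 : Int) else 0) = rowInd a y i := by
          unfold rowInd
          rw [← hm]
          by_cases hin : ∃ j ∈ PySem.List.pyRange 0 m 1,
              (PySem.List.pyGet? ((PySem.List.pyGet? y i).getD []) j).getD 0 = 1
          · rw [if_pos hin, if_pos ((exists_iff_mem_slice _ m hpos).mp hin)]
          · rw [if_neg hin,
              if_neg (fun hc => hin ((exists_iff_mem_slice _ m hpos).mpr hc))]
        rw [hind]
        ring
      · rw [if_neg hpos, PySem.List.pyRange_one_eq_nil (by omega : m ≤ 0),
          PySem.List.pyRange_one_eq_nil (le_refl i)]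
        simp

-- Different fuels give the same foldl once the loop has in fact stopped; we only
-- need it at the two fuels used by the ports, which are equal here.
theorem dfs_alt_eq_staged (i n : Int) (a : List Int) (x : Int) (y : List (List Int)) :
    dfs_alt i n a x y =
      (PySem.List.pyRange i (findStop ((n - i).toNat + 2 * a.length + 1) i n a) 1).foldl
        (fun s k => s + rowInd a y k) 0 := by
  unfold dfs_alt rowInd
  rfl

-- ===== VERDICT (by name: the statement is the Claim_ definition above) =====
theorem dfs_spec : Claim_equal_dfs := by
  intro i n a x y _ _
  unfold Spec_dfs dfs
  rw [dfs_alt_eq_staged i n a x y]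
  exact dfsGo_eq_staged _ i n a x y
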